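-- pv_equiv track=rewrite | github.com/Amanms1402/python-programmes | square.py | square_numbers
-- ===== SOURCE A (Python) =====
-- def square_numbers(start, end):
--     squared_nums = []
--     sum_squared = 0
--     for num in range(start, end + 1):
--         squared = num ** 2
--         squared_nums.append(squared)
--         sum_squared += squared
--     return squared_nums, sum_squared
-- ===== SOURCE B (Python) =====
-- def square_numbers(start, end):
--     if start > end:
--         return [], 0
--
--     def f(n):
--         return n * (n + 1) * (2 * n + 1) // 6
--
--     return [n * n for n in range(start, end + 1)], f(end) - f(start - 1)
-- ===== Notes on version B (the rewrite author's own statement) =====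
-- stated objective: alternative
-- what changed: The sum of squares is computed in closed form (n(n+1)(2n+1)/6 telescoped over the endpoints) instead of being accumulated in the loop; the list is built by a comprehension and the empty range is an explicit early return.
import Mathlib
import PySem

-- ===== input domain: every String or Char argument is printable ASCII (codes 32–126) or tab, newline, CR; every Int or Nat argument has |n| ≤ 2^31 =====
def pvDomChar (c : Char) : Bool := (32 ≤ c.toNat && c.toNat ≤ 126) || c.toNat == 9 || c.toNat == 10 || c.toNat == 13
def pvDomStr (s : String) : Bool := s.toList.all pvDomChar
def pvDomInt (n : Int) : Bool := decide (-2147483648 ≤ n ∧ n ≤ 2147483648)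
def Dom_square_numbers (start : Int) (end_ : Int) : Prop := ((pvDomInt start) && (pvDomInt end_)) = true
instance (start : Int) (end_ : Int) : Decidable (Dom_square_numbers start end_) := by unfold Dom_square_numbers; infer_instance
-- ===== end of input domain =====

-- B computes the sum of squares in closed form (telescoped n(n+1)(2n+1)//6) instead of accumulating it in the loop; same return value.

-- ===== PORT A =====
def square_numbers (start : Int) (end_ : Int) : List Int × Int :=
  (PySem.List.pyRange start (end_ + 1) 1).foldl
    (fun acc num => (acc.1 ++ [num ^ 2], acc.2 + num ^ 2)) ([], 0)

-- ===== PORT B =====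
-- helper f(n) = n*(n+1)*(2*n+1) // 6 from Source B
def pvSumSqTo (n : Int) : Int := PySem.Int.floordiv (n * (n + 1) * (2 * n + 1)) 6

def square_numbers_alt (start : Int) (end_ : Int) : List Int × Int :=
  if start > end_ then ([], 0)
  else ((PySem.List.pyRange start (end_ + 1) 1).map (fun n => n * n),
        pvSumSqTo end_ - pvSumSqTo (start - 1))

-- ===== PRECONDITION & SPEC =====
def Spec_square_numbers (start : Int) (end_ : Int) (out : List Int × Int) : Prop := out = square_numbers_alt start end_
instance (start : Int) (end_ : Int) (out : List Int × Int) : Decidable (Spec_square_numbers start end_ out) := by unfold Spec_square_numbers; infer_instance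

-- ===== CLAIM (what is proved, stated in full; the proofs are below) =====
def Claim_equal_square_numbers : Prop := ∀ (start : Int) (end_ : Int), Dom_square_numbers start end_ → Spec_square_numbers start end_ (square_numbers start end_)

-- ===== LEMMAS AND PROOFS =====

theorem six_dvd_pvG (n : Int) : (6 : Int) ∣ n * (n + 1) * (2 * n + 1) := by
  have hmod : n ≡ n % 6 [ZMOD 6] := (Int.ModEq.symm (Int.emod_emod_of_dvd n (dvd_refl 6)))
  have hg : n * (n + 1) * (2 * n + 1) ≡ (n % 6) * ((n % 6) + 1) * (2 * (n % 6) + 1) [ZMOD 6] :=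
    (hmod.mul (hmod.add_right 1)).mul ((hmod.mul_left 2).add_right 1)
  have hr0 : 0 ≤ n % 6 := Int.emod_nonneg n (by norm_num)
  have hr6 : n % 6 < 6 := Int.emod_lt_of_pos n (by norm_num)
  have hdr : (6 : Int) ∣ (n % 6) * ((n % 6) + 1) * (2 * (n % 6) + 1) := by
    interval_cases h : (n % 6) <;> decide
  exact Int.modEq_zero_iff_dvd.mp (hg.trans (Int.modEq_zero_iff_dvd.mpr hdr))

-- f n = f (n-1) + n^2
theorem pvSumSqTo_step (n : Int) : pvSumSqTo n = pvSumSqTo (n - 1) + n ^ 2 := by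
  obtain ⟨k, hk⟩ := six_dvd_pvG n
  obtain ⟨k', hk'⟩ := six_dvd_pvG (n - 1)
  have hkk : k = k' + n ^ 2 := by nlinarith [hk, hk']
  unfold pvSumSqTo
  rw [PySem.Int.floordiv_eq_ediv_of_pos (by norm_num),
      PySem.Int.floordiv_eq_ediv_of_pos (by norm_num), hk, hk']
  rw [Int.mul_ediv_cancel_left _ (by norm_num : (6:Int) ≠ 0),
      Int.mul_ediv_cancel_left _ (by norm_num : (6:Int) ≠ 0)]
  omega

-- sum of squares over pyRange a b 1 equals the telescoped closed form, for a ≤ b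
theorem pvSum_range (a b : Int) (h : a ≤ b) :
    ((PySem.List.pyRange a b 1).map (fun n => n * n)).sum = pvSumSqTo (b - 1) - pvSumSqTo (a - 1) := by
  obtain ⟨k, hk⟩ : ∃ k : Nat, b = a + k := ⟨(b - a).toNat, by omega⟩
  subst hk
  induction k with
  | zero => simp
  | succ m ih =>
    have hb : a + ((m : Int) + 1) = (a + m) + 1 := by ring
    rw [show ((m + 1 : Nat) : Int) = (m : Int) + 1 by push_cast; ring, hb,
        PySem.List.pyRange_one_succ_right (by omega : a ≤ a + (m : Int))]
    rw [List.map_append, List.sum_append]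
    rw [ih (by omega)]
    simp only [List.map_cons, List.map_nil, List.sum_cons, List.sum_nil]
    have : ((a + (m:Int)) + 1) - 1 = a + (m:Int) := by ring
    rw [this, pvSumSqTo_step (a + (m:Int))]
    ring

-- A's fold appends squares and accumulates their sum
theorem pvFold_char (l : List Int) (acc : List Int) (s : Int) :
    l.foldl (fun acc num => (acc.1 ++ [num ^ 2], acc.2 + num ^ 2)) (acc, s)
      = (acc ++ l.map (fun n => n * n), s + (l.map (fun n => n * n)).sum) := by
  induction l generalizing acc s with
  | nil => simp
  | cons x xs ih =>
    simp only [List.foldl_cons, List.map_cons, List.sum_cons, ih]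
    refine Prod.ext ?_ ?_
    · simp [pow_two]
    · simp [pow_two]; ring

-- ===== VERDICT (by name: the statement is the Claim_ definition above) =====
theorem square_numbers_spec : Claim_equal_square_numbers := by
  intro start end_ _
  unfold Spec_square_numbers square_numbers square_numbers_alt
  by_cases h : start > end_
  · rw [PySem.List.pyRange_one_eq_nil (by omega)]
    simp [h]
  · rw [pvFold_char]
    rw [pvSum_range start (end_ + 1) (by omega)]
    simp [h]
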